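-- pv_equiv track=rewrite | github.com/CHamers/python_exercises | summerOf69.py | summerOf69
-- ===== SOURCE A (Python) =====
-- def summerOf69(arr):
--     total = 0
--     add = True
--     for num in arr:
--         while add:
--             if num != 6:
--                 total += num
--                 break
--             else:
--                 add = False
--         while not add:
--             if num != 9:
--                 break
--             else:
--                 add = True
--     return total
-- ===== SOURCE B (Python) =====
-- def summerOf69(arr):
--     it = iter(arr)
--     total = 0
--     for num in it:
--         if num == 6:
--             for n2 in it:
--                 if n2 == 9:
--                     break
--         else:
--             total += num
--     return total
-- ===== Notes on version B (the rewrite author's own statement) =====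
-- stated objective: alternative
-- what changed: B drops A's persistent boolean flag and its two inner while-loops: it walks one shared iterator, and on seeing 6 a nested inner loop consumes the same iterator until a 9, so the skip state lives in control flow instead of a flag.
import Mathlib
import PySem

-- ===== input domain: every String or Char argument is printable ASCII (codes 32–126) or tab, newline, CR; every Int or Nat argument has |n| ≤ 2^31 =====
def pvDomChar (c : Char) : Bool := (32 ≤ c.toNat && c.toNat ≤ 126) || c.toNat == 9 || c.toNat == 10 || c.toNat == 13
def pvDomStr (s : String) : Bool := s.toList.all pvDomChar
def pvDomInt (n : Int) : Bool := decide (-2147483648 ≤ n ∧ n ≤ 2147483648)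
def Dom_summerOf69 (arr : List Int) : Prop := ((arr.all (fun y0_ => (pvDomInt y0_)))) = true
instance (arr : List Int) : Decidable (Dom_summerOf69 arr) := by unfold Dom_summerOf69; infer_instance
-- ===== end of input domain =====

-- ===== PORT A =====
-- A: one pass holding the skip state in a persistent boolean flag `add`.
-- Each step of A's for-loop: the `while add` body runs (at most once to effect),
-- then the `while not add` body; ported as one recursion over (total, add).
def summerOf69Loop (arr : List Int) (total : Int) (add : Bool) : Int :=
  match arr with
  | [] => total
  | num :: rest =>
    if add then
      -- while add: if num != 6: total += num; break  else add = False (then while-not-add breaks, num=6 ≠ 9)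
      if num ≠ 6 then summerOf69Loop rest (total + num) true
      else summerOf69Loop rest total false
    else
      -- while not add: if num != 9: break else add = True
      if num ≠ 9 then summerOf69Loop rest total false
      else summerOf69Loop rest total true

def summerOf69 (arr : List Int) : Int := summerOf69Loop arr 0 true

-- ===== PORT B =====
-- B: shared-iterator decomposition: outer loop adds, and on a 6 an inner loop
-- consumes the same iterator until a 9. The remaining iterator is the list tail,
-- so the two loops become two mutually recursive functions over the tail.
mutual
def summerOf69AltMain (arr : List Int) (total : Int) : Int :=
  match arr with
  | [] => total
  | num :: rest =>
    if num = 6 then summerOf69AltSkip rest total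
    else summerOf69AltMain rest (total + num)

def summerOf69AltSkip (arr : List Int) (total : Int) : Int :=
  match arr with
  | [] => total
  | n2 :: rest =>
    if n2 = 9 then summerOf69AltMain rest total
    else summerOf69AltSkip rest total
end

def summerOf69_alt (arr : List Int) : Int := summerOf69AltMain arr 0

-- ===== PRECONDITION & SPEC =====
def Spec_summerOf69 (arr : List Int) (out : Int) : Prop := out = summerOf69_alt arr
instance (arr : List Int) (out : Int) : Decidable (Spec_summerOf69 arr out) := by unfold Spec_summerOf69; infer_instance

-- ===== CLAIM (what is proved, stated in full; the proofs are below) =====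
def Claim_equal_summerOf69 : Prop := ∀ (arr : List Int), Dom_summerOf69 arr → Spec_summerOf69 arr (summerOf69 arr)

-- ===== LEMMAS AND PROOFS =====

-- ===== VERDICT (by name: the statement is the Claim_ definition above) =====
-- The ports agree from any common state: A with add=true matches B's outer loop,
-- A with add=false matches B's inner (skipping) loop.
theorem summerOf69_state_eq (arr : List Int) : ∀ total : Int,
    summerOf69Loop arr total true = summerOf69AltMain arr total ∧
    summerOf69Loop arr total false = summerOf69AltSkip arr total := by
  induction arr with
  | nil => intro total; exact ⟨rfl, rfl⟩
  | cons num rest ih =>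
    intro total
    constructor
    · by_cases h : num = 6
      · simp [summerOf69Loop, summerOf69AltMain, h, (ih total).2]
      · simp [summerOf69Loop, summerOf69AltMain, h, (ih (total + num)).1]
    · by_cases h : num = 9
      · simp [summerOf69Loop, summerOf69AltSkip, h, (ih total).1]
      · simp [summerOf69Loop, summerOf69AltSkip, h, (ih total).2]

theorem summerOf69_spec : Claim_equal_summerOf69 := by
  intro arr _
  unfold Spec_summerOf69 summerOf69 summerOf69_alt
  exact (summerOf69_state_eq arr 0).1
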